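-- pv_equiv track=rewrite | github.com/adampolak/first-fit | runs/results_numcolors/gen_286/main.py | _insert_tail_caps
-- ===== SOURCE A (Python) =====
-- def _insert_tail_caps(T, caps, cap_cap):
--     """Safely insert tail caps up to a cap_cap budget."""
--     room = cap_cap - len(T)
--     if room <= 0:
--         return T
--     for i, iv in enumerate(caps[:room]):
--         pos = len(T) - (i * 2 + 1)
--         if pos < 0:
--             T.append(iv)
--         else:
--             T.insert(pos, iv)
--     return T
-- ===== SOURCE B (Python) =====
-- def _insert_tail_caps(T, caps, cap_cap):
--     """Safely insert tail caps up to a cap_cap budget.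
--
--     Single pass: walk T from the back and the used caps from the front in
--     lockstep, weaving them into a reversed middle section, then assemble the
--     result once instead of repeated list.insert calls at decreasing positions.
--     Mutates T in place and returns it, like A.
--     """
--     room = cap_cap - len(T)
--     if room <= 0:
--         return T
--     used = caps[:room]
--     rev = T[::-1]
--     w = []
--     i = 0
--     while i < len(used) and i < len(rev):
--         w.append(rev[i])
--         w.append(used[i])
--         i += 1
--     if i < len(used):
--         out = w[::-1] + used[i:]
--     else:
--         out = rev[i:][::-1] + w[::-1]
--     T[:] = out
--     return T
-- ===== Notes on version B (the rewrite author's own statement) =====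
-- stated objective: alternative
-- what changed: A repeatedly calls list.insert at decreasing positions, shifting the tail each time; B weaves the reversed tail of T with the used caps in one lockstep pass and assembles the result list once.
import Mathlib
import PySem

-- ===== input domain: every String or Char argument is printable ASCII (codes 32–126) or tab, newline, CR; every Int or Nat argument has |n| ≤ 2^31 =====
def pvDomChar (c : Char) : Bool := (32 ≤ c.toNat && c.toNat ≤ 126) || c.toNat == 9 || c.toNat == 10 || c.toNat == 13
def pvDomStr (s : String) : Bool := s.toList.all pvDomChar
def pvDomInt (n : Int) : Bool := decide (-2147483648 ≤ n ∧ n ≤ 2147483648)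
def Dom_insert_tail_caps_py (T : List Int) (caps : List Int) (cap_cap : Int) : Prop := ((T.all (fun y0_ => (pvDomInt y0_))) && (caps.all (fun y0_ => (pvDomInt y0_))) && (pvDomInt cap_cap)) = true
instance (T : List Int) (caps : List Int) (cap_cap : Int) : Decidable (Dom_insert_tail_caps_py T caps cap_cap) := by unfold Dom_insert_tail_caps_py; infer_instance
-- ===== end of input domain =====

-- B replaces A's loop of list.insert calls at decreasing positions by a single back-to-front
-- weave of T and the used caps, assembled once (objective: alternative). Both A and B mutate
-- the Python argument T in place and return it; the equivalence proved is about the return value.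

-- ===== PORT A =====
-- the 'for i, iv in enumerate(caps[:room])' loop, index i carried explicitly
def pvALoop : Nat → List Int → List Int → List Int
  | _, [], acc => acc
  | i, c :: cs, acc =>
      let pos : Int := (acc.length : Int) - (i * 2 + 1)
      pvALoop (i + 1) cs (if pos < 0 then acc ++ [c] else PySem.List.insert acc pos c)

def insert_tail_caps_py (T : List Int) (caps : List Int) (cap_cap : Int) : List Int :=
  let room : Int := cap_cap - (T.length : Int)
  if room ≤ 0 then T
  else pvALoop 0 (PySem.List.slice caps none (some room)) T

-- ===== PORT B =====
-- the while loop of Source B: walk reversed T and the used caps in lockstep, prepending onto w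
-- (Lean's w is Source B's w reversed, so the final w[::-1] is already done); then assemble once.
def pvBLoop : List Int → List Int → List Int → List Int
  | c :: cs, x :: xs, w => pvBLoop cs xs (c :: x :: w)
  | [], xs, w => xs.reverse ++ w          -- caps exhausted: rev[i:][::-1] + w[::-1]
  | cs, [], w => w ++ cs                  -- T exhausted: w[::-1] + used[i:]

def insert_tail_caps_py_alt (T : List Int) (caps : List Int) (cap_cap : Int) : List Int :=
  let room : Int := cap_cap - (T.length : Int)
  if room ≤ 0 then T
  else pvBLoop (PySem.List.slice caps none (some room)) T.reverse []

-- ===== PRECONDITION & SPEC =====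
def Spec_insert_tail_caps_py (T : List Int) (caps : List Int) (cap_cap : Int) (out : List Int) : Prop := out = insert_tail_caps_py_alt T caps cap_cap
instance (T : List Int) (caps : List Int) (cap_cap : Int) (out : List Int) : Decidable (Spec_insert_tail_caps_py T caps cap_cap out) := by unfold Spec_insert_tail_caps_py; infer_instance

-- ===== CLAIM (what is proved, stated in full; the proofs are below) =====
def Claim_equal_insert_tail_caps_py : Prop := ∀ (T : List Int) (caps : List Int) (cap_cap : Int), Dom_insert_tail_caps_py T caps cap_cap → Spec_insert_tail_caps_py T caps cap_cap (insert_tail_caps_py T caps cap_cap)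

-- ===== LEMMAS AND PROOFS =====

-- once the accumulator is short enough (length ≤ 2*i), every remaining step appends
lemma pvALoop_append (cs : List Int) : ∀ (i : Nat) (w : List Int), w.length ≤ 2 * i →
    pvALoop i cs w = w ++ cs := by
  induction cs with
  | nil => intro i w _; simp [pvALoop]
  | cons c cs ih =>
      intro i w hw
      have hneg : ((w.length : Int) - (i * 2 + 1)) < 0 := by omega
      simp only [pvALoop, if_pos hneg]
      rw [ih (i + 1) (w ++ [c]) (by simp; omega)]
      simp

-- main invariant: at cap index i the state is Xr.reverse ++ w with w.length = 2*i
lemma pvALoop_eq_pvBLoop (cs : List Int) : ∀ (i : Nat) (Xr w : List Int), w.length = 2 * i →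
    pvALoop i cs (Xr.reverse ++ w) = pvBLoop cs Xr w := by
  induction cs with
  | nil => intro i Xr w _; simp [pvALoop, pvBLoop]
  | cons c cs ih =>
      intro i Xr w hw
      cases Xr with
      | nil =>
          have hneg : (((([] : List Int).reverse ++ w).length : Int) - (i * 2 + 1)) < 0 := by
            simp; push_cast; omega
          simp only [pvALoop, if_pos hneg]
          simp only [List.reverse_nil, List.nil_append]
          rw [pvALoop_append cs (i + 1) (w ++ [c]) (by simp; omega)]
          simp [pvBLoop]
      | cons x xs =>
          have hlen : ((x :: xs).reverse ++ w).length = xs.length + 1 + 2 * i := by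
            simp; omega
          have hpos : ((((x :: xs).reverse ++ w).length : Int) - (i * 2 + 1)) = (xs.length : Int) := by
            rw [hlen]; push_cast; ring
          have hnotneg : ¬ ((((x :: xs).reverse ++ w).length : Int) - (i * 2 + 1)) < 0 := by
            rw [hpos]; omega
          simp only [pvALoop, hpos]
          rw [PySem.List.insert_natCast _ _ _ (by rw [hlen]; omega)]
          have hsplit : (x :: xs).reverse ++ w = xs.reverse ++ (x :: w) := by simp
          rw [hsplit, List.take_left' (by simp), List.drop_left' (by simp),
              if_neg (show ¬ ((xs.length : Int) < 0) by omega)]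
          rw [ih (i + 1) xs (c :: x :: w) (by simp; omega)]
          simp [pvBLoop]

-- ===== VERDICT (by name: the statement is the Claim_ definition above) =====
theorem insert_tail_caps_py_spec : Claim_equal_insert_tail_caps_py := by
  intro T caps cap_cap _
  unfold Spec_insert_tail_caps_py insert_tail_caps_py insert_tail_caps_py_alt
  by_cases h : cap_cap - (T.length : Int) ≤ 0
  · simp [h]
  · simp only [if_neg h]
    have := pvALoop_eq_pvBLoop (PySem.List.slice caps none (some (cap_cap - (T.length : Int)))) 0 T.reverse [] (by simp)
    simpa using this
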